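-- pv_equiv track=rewrite | github.com/CBA-UPC/PPT-GNN | data_handling/graph_building.py | _get_repeated_flow_connection_src_dst_list
-- ===== SOURCE A (Python) =====
-- def _get_repeated_flow_connection_src_dst_list(windows):
--         connection_indexes = {}
--         flattened_windows = [item for sublist in windows for item in sublist]
--         for idx, con in enumerate(flattened_windows):
--             if con not in connection_indexes:
--                 connection_indexes[con] = [idx]
--             else:
--                 connection_indexes[con].append(idx)
--
--         source_indices = []
--         target_indices = []
--         for con in connection_indexes:
--             for i in range(len(connection_indexes[con])-1):
--                 source_indices.append(connection_indexes[con][i])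
--                 target_indices.append(connection_indexes[con][i+1])
--
--         return source_indices, target_indices
-- ===== SOURCE B (Python) =====
-- def _get_repeated_flow_connection_src_dst_list(windows):
--     # Single pass: keep only the most recent index per connection and stream
--     # consecutive-occurrence edges into per-connection buckets (registered at
--     # first appearance to preserve first-seen ordering), then concatenate.
--     last = {}
--     buckets = {}
--     idx = 0
--     for sublist in windows:
--         for con in sublist:
--             if con in last:
--                 buckets[con].append((last[con], idx))
--             else:
--                 buckets[con] = []
--             last[con] = idx
--             idx += 1
--
--     source_indices = []
--     target_indices = []
--     for con in buckets:
--         for s, t in buckets[con]: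
--             source_indices.append(s)
--             target_indices.append(t)
--     return source_indices, target_indices
-- ===== Notes on version B (the rewrite author's own statement) =====
-- stated objective: alternative
-- what changed: Instead of collecting the full index list per connection and then pairing consecutive entries in a second keyed pass, B streams over the (un-flattened) windows once, keeping only each connection's most recent index and appending each edge to a per-connection bucket the moment the connection recurs, then concatenates the buckets in first-seen order.
import Mathlib
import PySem

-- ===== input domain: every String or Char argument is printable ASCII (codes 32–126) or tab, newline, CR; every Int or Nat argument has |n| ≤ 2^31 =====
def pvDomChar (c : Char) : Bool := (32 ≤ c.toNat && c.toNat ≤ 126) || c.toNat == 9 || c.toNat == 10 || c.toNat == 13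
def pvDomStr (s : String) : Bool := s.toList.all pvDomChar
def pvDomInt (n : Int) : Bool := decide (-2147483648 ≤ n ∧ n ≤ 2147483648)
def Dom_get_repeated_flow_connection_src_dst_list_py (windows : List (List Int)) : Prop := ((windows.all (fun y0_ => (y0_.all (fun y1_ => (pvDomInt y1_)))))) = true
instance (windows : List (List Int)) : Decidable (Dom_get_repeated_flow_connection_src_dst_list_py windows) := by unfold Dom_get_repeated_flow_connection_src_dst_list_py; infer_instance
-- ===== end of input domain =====

-- B replaces A's two-phase "collect every connection's full index list, then pair consecutive
-- entries in a second keyed pass" by a single streaming pass that keeps only each connection's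
-- most recent index and appends edges to per-connection buckets (objective: alternative).


-- ===== PORT A =====
-- first loop body: if con not in connection_indexes: … = [idx] else: ….append(idx)
def pvAStep (d : PySem.Dict Int (List Int)) (p : Int × Int) : PySem.Dict Int (List Int) :=
  if d.contains p.2 = false then d.insert p.2 [p.1]
  else d.insert p.2 ((d.get? p.2).getD [] ++ [p.1])

-- second loop body: for i in range(len(connection_indexes[con])-1): append the two neighbours
def pvAEmit (ci : PySem.Dict Int (List Int)) (st : List Int × List Int) (con : Int) :
    List Int × List Int :=
  let L := (ci.get? con).getD []
  (PySem.List.pyRange 0 ((L.length : Int) - 1) 1).foldl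
    (fun st i => (st.1 ++ [PySem.List.pyGetD L i 0], st.2 ++ [PySem.List.pyGetD L (i + 1) 0])) st

def get_repeated_flow_connection_src_dst_list_py (windows : List (List Int)) : List Int × List Int :=
  let flattened_windows : List Int := windows.flatMap id
  let connection_indexes : PySem.Dict Int (List Int) :=
    (PySem.List.enumerate flattened_windows).foldl pvAStep PySem.Dict.empty
  connection_indexes.keys.foldl (pvAEmit connection_indexes) ([], [])

-- ===== PORT B =====
-- inner-loop body of Source B's scan: state = ((last, buckets), idx)
def pvBScan (st : (PySem.Dict Int Int × PySem.Dict Int (List (Int × Int))) × Int) (con : Int) :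
    (PySem.Dict Int Int × PySem.Dict Int (List (Int × Int))) × Int :=
  match st.1.1.get? con with
  | some p => ((st.1.1.insert con st.2,
                st.1.2.insert con ((st.1.2.get? con).getD [] ++ [(p, st.2)])), st.2 + 1)
  | none   => ((st.1.1.insert con st.2, st.1.2.insert con []), st.2 + 1)

-- final loop body of Source B: for s, t in buckets[con]: append s / append t
def pvBEmit (buckets : PySem.Dict Int (List (Int × Int))) (st : List Int × List Int) (con : Int) :
    List Int × List Int :=
  ((buckets.get? con).getD []).foldl (fun st e => (st.1 ++ [e.1], st.2 ++ [e.2])) st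

def get_repeated_flow_connection_src_dst_list_py_alt (windows : List (List Int)) :
    List Int × List Int :=
  let s := windows.foldl (fun st sublist => sublist.foldl pvBScan st)
    ((PySem.Dict.empty, PySem.Dict.empty), 0)
  let buckets := s.1.2
  buckets.keys.foldl (pvBEmit buckets) ([], [])

-- ===== PRECONDITION & SPEC =====
def Spec_get_repeated_flow_connection_src_dst_list_py (windows : List (List Int)) (out : List Int × List Int) : Prop := out = get_repeated_flow_connection_src_dst_list_py_alt windows
instance (windows : List (List Int)) (out : List Int × List Int) : Decidable (Spec_get_repeated_flow_connection_src_dst_list_py windows out) := by unfold Spec_get_repeated_flow_connection_src_dst_list_py; infer_instance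

-- ===== CLAIM (what is proved, stated in full; the proofs are below) =====
def Claim_equal_get_repeated_flow_connection_src_dst_list_py : Prop := ∀ (windows : List (List Int)), Dom_get_repeated_flow_connection_src_dst_list_py windows → Spec_get_repeated_flow_connection_src_dst_list_py windows (get_repeated_flow_connection_src_dst_list_py windows)

-- ===== LEMMAS AND PROOFS =====

-- the invariant tying A's index-list dict to B's (last, buckets) pair: same keys in the same
-- order; per key, buckets holds the consecutive pairs of A's index list, last its last index
def pvRel (dA : PySem.Dict Int (List Int)) (last : PySem.Dict Int Int)
    (buckets : PySem.Dict Int (List (Int × Int))) : Prop :=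
  last.items = dA.items.map (fun p => (p.1, p.2.getLastD 0)) ∧
  buckets.items = dA.items.map (fun p => (p.1, p.2.zip (p.2.drop 1))) ∧
  ∀ p ∈ dA.items, p.2 ≠ []

-- first-match lookup commutes with mapping the values of the items list
theorem pv_lookup_map {α β : Type} (f : Int → α → β) (l : List (Int × α)) (k : Int) :
    (PySem.Dict.mk (l.map (fun p => (p.1, f p.1 p.2)))).get? k
      = ((PySem.Dict.mk l).get? k).map (f k) := by
  induction l with
  | nil => simp [PySem.Dict.get?]
  | cons p t ih =>
    obtain ⟨pk, pv⟩ := p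
    simp only [List.map_cons, PySem.Dict.get?_mk_cons]
    by_cases h : pk = k
    · simp [h]
    · simp only [beq_iff_eq, h, if_false, ih]

theorem pv_zip_snoc (L : List Int) (h : L ≠ []) (x : Int) :
    (L ++ [x]).zip ((L ++ [x]).drop 1) = L.zip (L.drop 1) ++ [(L.getLastD 0, x)] := by
  induction L with
  | nil => simp at h
  | cons a t ih =>
    cases t with
    | nil => simp
    | cons b t' =>
      have := ih (by simp)
      simp only [List.cons_append, List.drop_succ_cons, List.drop_zero, List.zip_cons_cons] at this ⊢
      simp [this]

theorem pv_step_pres (dA : PySem.Dict Int (List Int)) (last : PySem.Dict Int Int)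
    (buckets : PySem.Dict Int (List (Int × Int))) (c i : Int)
    (h : pvRel dA last buckets) :
    pvRel (pvAStep dA (i, c)) (pvBScan ((last, buckets), i) c).1.1
      (pvBScan ((last, buckets), i) c).1.2 ∧ (pvBScan ((last, buckets), i) c).2 = i + 1 := by
  obtain ⟨hl, hb, hne⟩ := h
  have hlg : last.get? c = (dA.get? c).map (fun L => L.getLastD 0) := by
    have he : last = PySem.Dict.mk (dA.items.map (fun p => (p.1, p.2.getLastD 0))) := by
      apply PySem.Dict.ext; exact hl
    rw [he]; exact pv_lookup_map (fun _ v => v.getLastD 0) dA.items c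
  have hbg : buckets.get? c = (dA.get? c).map (fun L => L.zip (L.drop 1)) := by
    have he : buckets = PySem.Dict.mk (dA.items.map (fun p => (p.1, p.2.zip (p.2.drop 1)))) := by
      apply PySem.Dict.ext; exact hb
    rw [he]; exact pv_lookup_map (fun _ v => v.zip (v.drop 1)) dA.items c
  cases hg : dA.get? c with
  | none =>
    have hcA : dA.contains c = false := by rw [PySem.Dict.contains_eq_isSome_get?, hg]; rfl
    have hcL : last.contains c = false := by rw [PySem.Dict.contains_eq_isSome_get?, hlg, hg]; rfl
    have hcB : buckets.contains c = false := by rw [PySem.Dict.contains_eq_isSome_get?, hbg, hg]; rfl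
    have hlget : last.get? c = none := by rw [hlg, hg]; rfl
    refine ⟨⟨?_, ?_, ?_⟩, ?_⟩ <;>
      simp only [pvAStep, pvBScan, hlget, hcA, if_true]
    · simp [PySem.Dict.items_insert, hcL, hcA, hl]
    · simp [PySem.Dict.items_insert, hcB, hcA, hb]
    · intro p hp
      simp only [PySem.Dict.items_insert, hcA] at hp
      rcases List.mem_append.1 hp with hp | hp
      · exact hne p hp
      · simp at hp; subst hp; simp
  | some L =>
    have hmem : (c, L) ∈ dA.items := PySem.Dict.mem_items_of_get?_eq_some dA hg
    have hL : L ≠ [] := hne _ hmem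
    have hcA : dA.contains c = true := by rw [PySem.Dict.contains_eq_isSome_get?, hg]; rfl
    have hcL : last.contains c = true := by rw [PySem.Dict.contains_eq_isSome_get?, hlg, hg]; rfl
    have hcB : buckets.contains c = true := by rw [PySem.Dict.contains_eq_isSome_get?, hbg, hg]; rfl
    have hlget : last.get? c = some (L.getLastD 0) := by rw [hlg, hg]; rfl
    have hbget : buckets.get? c = some (L.zip (L.drop 1)) := by rw [hbg, hg]; rfl
    refine ⟨⟨?_, ?_, ?_⟩, ?_⟩ <;>
      simp only [pvAStep, pvBScan, hlget, hcA, Bool.true_eq_false, if_false, hg, Option.getD_some, hbget]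
    · simp only [PySem.Dict.items_insert, hcL, hcA, if_true, hl]
      simp only [List.map_map]
      refine List.map_congr_left (fun p hp => ?_)
      by_cases hpc : p.1 = c <;> simp [Function.comp, hpc]
    · simp only [PySem.Dict.items_insert, hcB, hcA, if_true, hb]
      simp only [List.map_map]
      refine List.map_congr_left (fun p hp => ?_)
      by_cases hpc : p.1 = c
      · have hz := pv_zip_snoc L hL i
        simp only [List.drop_one, List.getLastD_eq_getLast?] at hz
        simp [Function.comp, hpc, hz]
      · simp [Function.comp, hpc]
    · intro p hp
      simp only [PySem.Dict.items_insert, hcA, if_true] at hp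
      obtain ⟨q, hq, rfl⟩ := List.mem_map.1 hp
      by_cases hqc : q.1 = c
      · simp [hqc]
      · simpa [hqc] using hne q hq

theorem pv_scan_inv (l : List Int) : ∀ (s : Int) (dA : PySem.Dict Int (List Int))
    (last : PySem.Dict Int Int) (buckets : PySem.Dict Int (List (Int × Int))),
    pvRel dA last buckets →
    pvRel ((PySem.List.enumerate l s).foldl pvAStep dA)
      (l.foldl pvBScan ((last, buckets), s)).1.1
      (l.foldl pvBScan ((last, buckets), s)).1.2 := by
  induction l with
  | nil => intro s dA last buckets h; simpa [PySem.List.enumerate_nil] using h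
  | cons c t ih =>
    intro s dA last buckets h
    rw [PySem.List.enumerate_cons]
    simp only [List.foldl_cons]
    have hstep := pv_step_pres dA last buckets c s h
    have he : pvBScan ((last, buckets), s) c
        = (((pvBScan ((last, buckets), s) c).1.1, (pvBScan ((last, buckets), s) c).1.2), s + 1) := by
      rw [← hstep.2]
    rw [he]
    exact ih (s + 1) _ _ _ hstep.1

-- A's inner range loop visits exactly the consecutive pairs of L
theorem pv_range_pairs (L : List Int) :
    (PySem.List.pyRange 0 ((L.length : Int) - 1) 1).map
      (fun i => (PySem.List.pyGetD L i 0, PySem.List.pyGetD L (i + 1) 0)) = L.zip (L.drop 1) := by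
  rw [PySem.List.pyRange_one]
  rw [List.map_map]
  apply List.ext_getElem
  · simp [List.length_zip]
  · intro k hk1 hk2
    simp only [List.length_map, List.length_range] at hk1
    have hk : k < L.length - 1 := by omega
    have hkl : k < L.length := by omega
    have hk1l : k + 1 < L.length := by omega
    simp only [Function.comp, List.getElem_map, List.getElem_range, List.getElem_zip,
      List.getElem_drop]
    have h1 : PySem.List.pyGetD L ((0 : Int) + (k : Int)) 0 = L[k] := by
      rw [zero_add, PySem.List.pyGetD_natCast, List.getD_eq_getElem _ _ hkl]
    have h2 : PySem.List.pyGetD L ((0 : Int) + (k : Int) + 1) 0 = L[k + 1] := by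
      have : (0 : Int) + (k : Int) + 1 = ((k + 1 : Nat) : Int) := by push_cast; ring
      rw [this, PySem.List.pyGetD_natCast, List.getD_eq_getElem _ _ hk1l]
    rw [h1, h2]; simp [show 1 + k = k + 1 from Nat.add_comm 1 k]

theorem pv_emit_eq (dA : PySem.Dict Int (List Int)) (last : PySem.Dict Int Int)
    (buckets : PySem.Dict Int (List (Int × Int))) (h : pvRel dA last buckets) :
    dA.keys.foldl (pvAEmit dA) ([], []) = buckets.keys.foldl (pvBEmit buckets) ([], []) := by
  obtain ⟨hl, hb, hne⟩ := h
  have hbg : ∀ con, buckets.get? con = (dA.get? con).map (fun L => L.zip (L.drop 1)) := by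
    intro con
    have he : buckets = PySem.Dict.mk (dA.items.map (fun p => (p.1, p.2.zip (p.2.drop 1)))) := by
      apply PySem.Dict.ext; exact hb
    rw [he]; exact pv_lookup_map (fun _ v => v.zip (v.drop 1)) dA.items con
  have hkeys : buckets.keys = dA.keys := by
    simp only [PySem.Dict.keys, hb, List.map_map]
    rfl
  rw [hkeys]
  have hfun : pvAEmit dA = pvBEmit buckets := by
    funext st con
    unfold pvAEmit pvBEmit
    have hP : (buckets.get? con).getD [] =
        ((dA.get? con).getD []).zip (((dA.get? con).getD []).drop 1) := by
      rw [hbg con]; cases dA.get? con <;> simp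
    rw [hP]
    rw [← pv_range_pairs ((dA.get? con).getD [])]
    rw [List.foldl_map]
  rw [hfun]

-- ===== VERDICT (by name: the statement is the Claim_ definition above) =====
theorem get_repeated_flow_connection_src_dst_list_py_spec : Claim_equal_get_repeated_flow_connection_src_dst_list_py := by
  intro windows _
  unfold Spec_get_repeated_flow_connection_src_dst_list_py
  simp only [get_repeated_flow_connection_src_dst_list_py,
    get_repeated_flow_connection_src_dst_list_py_alt]
  rw [show windows.foldl (fun st sublist => sublist.foldl pvBScan st)
        ((PySem.Dict.empty, PySem.Dict.empty), 0)
      = (windows.flatMap id).foldl pvBScan ((PySem.Dict.empty, PySem.Dict.empty), 0) from by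
    rw [List.flatMap_id, List.foldl_flatten]]
  have hrel0 : pvRel PySem.Dict.empty PySem.Dict.empty PySem.Dict.empty :=
    ⟨rfl, rfl, by intro p hp; cases hp⟩
  exact pv_emit_eq _ _ _ (pv_scan_inv (windows.flatMap id) 0 _ _ _ hrel0)
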